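-- pv_equiv track=rewrite | github.com/VasanthSadhasivan/NestMSA | nest_msa.py | create_peer_matrix
-- ===== SOURCE A (Python) =====
-- def create_peer_matrix(list_of_strings):
--     number_of_columns = len(list_of_strings)
--     number_of_rows = max(len(string) for string in list_of_strings)
--     matrix = [[None for c in range(number_of_columns)] for r in range(number_of_rows)]
--     for column_index in range(number_of_columns):
--         for row_index in range(len(list_of_strings[column_index])):
--             matrix[row_index][column_index] = list_of_strings[column_index][row_index]
--     return matrix
-- ===== SOURCE B (Python) =====
-- def create_peer_matrix(list_of_strings):
--     matrix = []
--     for width, s in enumerate(list_of_strings):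
--         for r in range(max(len(matrix), len(s))):
--             if r == len(matrix):
--                 matrix.append([None] * width)
--             matrix[r].append(s[r] if r < len(s) else None)
--     return matrix
-- ===== Notes on version B (the rewrite author's own statement) =====
-- stated objective: alternative
-- what changed: B makes one incremental pass over the strings, appending each string as a new column to a growing matrix (adding None-padded rows as it meets longer strings), instead of computing the global maximum length, pre-allocating a None grid and filling it column-by-column.
import Mathlib
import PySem

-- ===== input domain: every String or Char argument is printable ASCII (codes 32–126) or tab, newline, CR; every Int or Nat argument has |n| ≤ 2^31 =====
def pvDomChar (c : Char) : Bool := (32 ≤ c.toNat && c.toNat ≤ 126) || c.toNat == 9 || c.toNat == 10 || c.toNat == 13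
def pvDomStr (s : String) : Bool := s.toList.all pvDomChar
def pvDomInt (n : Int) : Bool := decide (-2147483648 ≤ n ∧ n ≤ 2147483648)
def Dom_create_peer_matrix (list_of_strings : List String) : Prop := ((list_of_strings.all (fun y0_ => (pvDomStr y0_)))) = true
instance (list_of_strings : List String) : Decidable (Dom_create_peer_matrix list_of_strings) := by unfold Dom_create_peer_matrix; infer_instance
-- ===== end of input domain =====

-- B makes one incremental pass over the strings, merging each string as a new column
-- into a growing matrix, instead of pre-allocating a max-sized None grid and filling
-- it column-by-column by mutation (objective: alternative).

-- ===== PORT A =====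
def create_peer_matrix (list_of_strings : List String) : List (List (Option String)) :=
  let number_of_columns := list_of_strings.length
  -- max(gen) over lengths; raises ValueError on an empty list, excluded by Pre_
  let number_of_rows := (PySem.List.max? (list_of_strings.map (fun s => s.toList.length)) (fun y => y)).getD 0
  let matrix := (List.range number_of_rows).map (fun _ => (List.range number_of_columns).map (fun _ => (none : Option String)))
  (List.range number_of_columns).foldl (fun m column_index =>
    (List.range ((list_of_strings.getD column_index "").toList.length)).foldl (fun m row_index =>
      m.set row_index ((m.getD row_index []).set column_index
        (some (String.mk [(list_of_strings.getD column_index "").toList.getD row_index ' '])))) m) matrix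

-- ===== PORT B =====
-- one iteration of B's outer loop: append string s as a new column, growing the matrix
def cpmStep (matrix : List (List (Option String))) (width : Int) (s : String) : List (List (Option String)) :=
  (List.range (max matrix.length s.toList.length)).foldl (fun m r =>
    let m := if r = m.length then m ++ [List.replicate width.toNat (none : Option String)] else m
    m.set r ((m.getD r []) ++ [if r < s.toList.length then some (String.mk [s.toList.getD r ' ']) else none])) matrix

def create_peer_matrix_alt (list_of_strings : List String) : List (List (Option String)) :=
  (PySem.List.enumerate list_of_strings 0).foldl (fun matrix ws => cpmStep matrix ws.1 ws.2) []

-- ===== PRECONDITION & SPEC =====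
-- Pre_ excludes only the empty list, on which A raises ValueError (max of empty sequence).
def Pre_create_peer_matrix (list_of_strings : List String) : Prop := list_of_strings ≠ []
instance (list_of_strings : List String) : Decidable (Pre_create_peer_matrix list_of_strings) := by unfold Pre_create_peer_matrix; infer_instance
def pvWitness_create_peer_matrix : List String := ["ab", "c"]

def Spec_create_peer_matrix (list_of_strings : List String) (out : List (List (Option String))) : Prop := out = create_peer_matrix_alt list_of_strings
instance (list_of_strings : List String) (out : List (List (Option String))) : Decidable (Spec_create_peer_matrix list_of_strings out) := by unfold Spec_create_peer_matrix; infer_instance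

-- ===== CLAIM (what is proved, stated in full; the proofs are below) =====
def Claim_equal_create_peer_matrix : Prop := ∀ (list_of_strings : List String), Dom_create_peer_matrix list_of_strings → Pre_create_peer_matrix list_of_strings → Spec_create_peer_matrix list_of_strings (create_peer_matrix list_of_strings)
-- ===== LEMMAS AND PROOFS =====

-- the common target matrix: row r, column c holds char r of string c (None past its end)
def pvMaxLen (xs : List String) : Nat := xs.foldl (fun a s => max a s.toList.length) 0
def pvCell (r : Nat) (s : String) : Option String :=
  if r < s.toList.length then some (String.mk [s.toList.getD r ' ']) else none
def pvM (xs : List String) : List (List (Option String)) :=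
  (List.range (pvMaxLen xs)).map (fun r => xs.map (pvCell r))

theorem pvMaxLen_append (p : List String) (s : String) :
    pvMaxLen (p ++ [s]) = max (pvMaxLen p) s.toList.length := by
  simp [pvMaxLen, List.foldl_append]

theorem pv_len_le_maxLen (p : List String) (s : String) (h : s ∈ p) :
    s.toList.length ≤ pvMaxLen p :=
  (PySem.List.le_foldl_max_nat p (fun s => s.toList.length) 0).2 s h

theorem pvM_length (xs : List String) : (pvM xs).length = pvMaxLen xs := by
  simp [pvM]

theorem pvM_getD (xs : List String) (r : Nat) (h : r < pvMaxLen xs) :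
    (pvM xs).getD r [] = xs.map (pvCell r) := by
  rw [List.getD_eq_getElem _ _ (by simpa [pvM] using h)]
  simp [pvM]

theorem pv_map_none (p : List String) (r : Nat) (h : pvMaxLen p ≤ r) :
    p.map (pvCell r) = List.replicate p.length none := by
  have hlen : (p.map (pvCell r)).length = p.length := by simp
  rw [← hlen]
  apply List.eq_replicate_of_mem
  intro x hx
  rcases List.mem_map.mp hx with ⟨t, ht, rfl⟩
  have := pv_len_le_maxLen p t ht
  unfold pvCell
  rw [if_neg (by omega)]

-- loop invariant of B's inner loop: after k rounds, rows 0..k-1 carry their new cell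
theorem pv_step_inv (p : List String) (s : String) (k : Nat)
    (hk : k ≤ max (pvMaxLen p) s.toList.length) :
    (((List.range k).foldl (fun m r =>
        (if r = m.length then m ++ [List.replicate ((p.length : Int)).toNat (none : Option String)] else m).set r
          (((if r = m.length then m ++ [List.replicate ((p.length : Int)).toNat (none : Option String)] else m).getD r []) ++
            [if r < s.toList.length then some (String.mk [s.toList.getD r ' ']) else none])) (pvM p)).length
        = max (pvMaxLen p) k)
    ∧ ∀ j, ((List.range k).foldl (fun m r =>
        (if r = m.length then m ++ [List.replicate ((p.length : Int)).toNat (none : Option String)] else m).set r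
          (((if r = m.length then m ++ [List.replicate ((p.length : Int)).toNat (none : Option String)] else m).getD r []) ++
            [if r < s.toList.length then some (String.mk [s.toList.getD r ' ']) else none])) (pvM p))[j]?
        = if j < k then some (p.map (pvCell j) ++ [pvCell j s]) else (pvM p)[j]? := by
  induction k with
  | zero => exact ⟨by simp [pvM], fun j => by simp⟩
  | succ k ih =>
    obtain ⟨hlen, hget⟩ := ih (by omega)
    rw [List.range_succ, List.foldl_append]
    simp only [List.foldl_cons, List.foldl_nil]
    set S := (List.range k).foldl (fun m r =>
        (if r = m.length then m ++ [List.replicate ((p.length : Int)).toNat (none : Option String)] else m).set r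
          (((if r = m.length then m ++ [List.replicate ((p.length : Int)).toNat (none : Option String)] else m).getD r []) ++
            [if r < s.toList.length then some (String.mk [s.toList.getD r ' ']) else none])) (pvM p) with hS
    by_cases hL : k < pvMaxLen p
    · -- row k already exists: no append happens
      have hne : ¬ k = S.length := by rw [hlen]; omega
      rw [if_neg hne]
      have hgd : S.getD k [] = p.map (pvCell k) := by
        rw [List.getD_eq_getElem?_getD, hget k, if_neg (by omega), ← pvM_getD p k hL,
          List.getD_eq_getElem?_getD]
      constructor
      · rw [List.length_set, hlen]; omega
      · intro j
        by_cases hj : j = k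
        · subst hj
          have hjlt : j < S.length := by rw [hlen]; omega
          rw [List.getElem?_set_self', List.getElem?_eq_getElem hjlt, if_pos (Nat.lt_succ_self j), hgd]
          rfl
        · rw [List.getElem?_set_ne (by omega), hget j]
          by_cases h1 : j < k
          · rw [if_pos h1, if_pos (by omega)]
          · rw [if_neg h1, if_neg (by omega)]
    · -- row k does not exist yet: a fresh padded row is appended first
      have hsl : k < s.toList.length := by omega
      have heq : k = S.length := by rw [hlen]; omega
      rw [if_pos heq]
      have hrep : List.replicate ((p.length : Int)).toNat (none : Option String) = List.replicate p.length none := by simp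
      have hgd : (S ++ [List.replicate ((p.length : Int)).toNat (none : Option String)]).getD k [] = p.map (pvCell k) := by
        rw [List.getD_eq_getElem?_getD, List.getElem?_append_right (by omega)]
        have hks : k - S.length = 0 := by omega
        rw [hks]
        simp only [List.getElem?_cons_zero, Option.getD_some, hrep]
        exact (pv_map_none p k (by omega)).symm
      constructor
      · rw [List.length_set, List.length_append, hlen]
        simp only [List.length_cons, List.length_nil]
        omega
      · intro j
        by_cases hj : j = k
        · subst hj
          have hjlt : j < (S ++ [List.replicate ((p.length : Int)).toNat (none : Option String)]).length := by
            rw [List.length_append, hlen]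
            simp only [List.length_cons, List.length_nil]
            omega
          rw [List.getElem?_set_self', List.getElem?_eq_getElem hjlt, if_pos (Nat.lt_succ_self j), hgd]
          rfl
        · rw [List.getElem?_set_ne (by omega)]
          by_cases h1 : j < k
          · rw [List.getElem?_append_left (by omega), hget j, if_pos h1, if_pos (by omega)]
          · have hjS : S.length ≤ j := by omega
            have hMnone : (pvM p)[j]? = none := by
              apply List.getElem?_eq_none
              rw [pvM_length]; omega
            have hAnone : (S ++ [List.replicate ((p.length : Int)).toNat (none : Option String)])[j]? = none := by
              apply List.getElem?_eq_none
              rw [List.length_append]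
              simp only [List.length_cons, List.length_nil]
              omega
            rw [hAnone, if_neg (by omega), hMnone]

theorem pvM_getElem? (xs : List String) (j : Nat) :
    (pvM xs)[j]? = if j < pvMaxLen xs then some (xs.map (pvCell j)) else none := by
  unfold pvM
  rw [List.getElem?_map]
  by_cases hj : j < pvMaxLen xs
  · rw [List.getElem?_range hj, if_pos hj]; rfl
  · rw [List.getElem?_eq_none (by simpa using hj), if_neg hj]; rfl

-- B's per-string step takes the matrix of p to the matrix of p ++ [s]
theorem pv_merge_step (p : List String) (s : String) :
    cpmStep (pvM p) (p.length : Int) s = pvM (p ++ [s]) := by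
  unfold cpmStep
  rw [pvM_length]
  obtain ⟨hlen, hget⟩ := pv_step_inv p s (max (pvMaxLen p) s.toList.length) (le_refl _)
  apply List.ext_getElem?
  intro j
  rw [hget j, pvM_getElem? (p ++ [s]) j, pvMaxLen_append]
  by_cases hj : j < max (pvMaxLen p) s.toList.length
  · rw [if_pos hj, if_pos hj]
    simp
  · rw [if_neg hj, if_neg hj, pvM_getElem?, if_neg (by omega)]

theorem pv_alt_eq_M (xs : List String) : create_peer_matrix_alt xs = pvM xs := by
  induction xs using List.reverseRecOn with
  | nil => simp [create_peer_matrix_alt, pvM, pvMaxLen, PySem.List.enumerate]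
  | append_singleton p s ih =>
    unfold create_peer_matrix_alt at *
    rw [PySem.List.enumerate_append, List.foldl_append, ih]
    simp only [PySem.List.enumerate, List.foldl_cons, List.foldl_nil]
    simpa using pv_merge_step p s

theorem pv_maxq_eq_maxLen (xs : List String) (h : xs ≠ []) :
    (PySem.List.max? (xs.map (fun s => s.toList.length)) (fun y => y)).getD 0 = pvMaxLen xs := by
  cases xs with
  | nil => exact absurd rfl h
  | cons y t =>
    simp only [List.map_cons, PySem.List.max?_id_cons, Option.getD_some, pvMaxLen,
      List.foldl_cons, List.foldl_map, Nat.zero_max]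

-- The inner (per-column) fold of A, entrywise: rows 0..n-1 get their cell ci set.
theorem pv_inner_getElem? (ci : Nat) (g : Nat → Option String) :
    ∀ (n : Nat) (m : List (List (Option String))) (r : Nat),
    ((List.range n).foldl (fun m ri => m.set ri ((m.getD ri []).set ci (g ri))) m)[r]?
      = if r < n then (m[r]?.map (fun row => row.set ci (g r))) else m[r]? := by
  intro n
  induction n with
  | zero => intro m r; simp
  | succ n ih =>
    intro m r
    rw [List.range_succ, List.foldl_append]
    simp only [List.foldl_cons, List.foldl_nil]
    set M := (List.range n).foldl (fun m ri => m.set ri ((m.getD ri []).set ci (g ri))) m with hM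
    have hMr : ∀ j, ¬ j < n → M[j]? = m[j]? := by
      intro j hj; rw [hM, ih m j, if_neg hj]
    by_cases hrn : r = n
    · subst hrn
      rw [List.getElem?_set_self']
      have hD : M.getD r [] = (m[r]?).getD [] := by
        rw [List.getD_eq_getElem?_getD, hMr r (by omega)]
      rw [hD, hMr r (by omega), if_pos (by omega)]
      cases m[r]? with
      | none => rfl
      | some row => rfl
    · rw [List.getElem?_set_ne (by omega), hM, ih m r]
      by_cases h1 : r < n
      · rw [if_pos h1, if_pos (by omega)]
      · rw [if_neg h1, if_neg (by omega)]

theorem pv_rowfold_length (xs : List String) (r : Nat) :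
    ∀ (k : Nat),
    ((List.range k).foldl (fun row ci => if r < (xs.getD ci "").toList.length then row.set ci (some (String.mk [(xs.getD ci "").toList.getD r ' '])) else row) ((List.range xs.length).map (fun _ => (none : Option String)))).length = xs.length := by
  intro k
  induction k with
  | zero => simp
  | succ k ih =>
    rw [List.range_succ, List.foldl_append]
    simp only [List.foldl_cons, List.foldl_nil]
    split
    · rw [List.length_set]; exact ih
    · exact ih

-- The per-row fold obtained from A's column loop, entrywise.
theorem pv_rowfold_getElem? (xs : List String) (r : Nat) :
    ∀ (k : Nat) (c : Nat),
    ((List.range k).foldl (fun row ci => if r < (xs.getD ci "").toList.length then row.set ci (some (String.mk [(xs.getD ci "").toList.getD r ' '])) else row) ((List.range xs.length).map (fun _ => (none : Option String))))[c]?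
      = if c < k ∧ c < xs.length then
          some (if r < (xs.getD c "").toList.length then some (String.mk [(xs.getD c "").toList.getD r ' ']) else none)
        else if c < xs.length then some none else none := by
  intro k
  induction k with
  | zero =>
    intro c
    simp only [List.range_zero, List.foldl_nil]
    rw [List.getElem?_map]
    by_cases hc : c < xs.length
    · rw [List.getElem?_range hc, if_neg (by omega), if_pos hc]; rfl
    · rw [List.getElem?_eq_none (by simpa using hc), if_neg (by omega), if_neg hc]; rfl
  | succ k ih =>
    intro c
    rw [List.range_succ, List.foldl_append]
    simp only [List.foldl_cons, List.foldl_nil]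
    set R := (List.range k).foldl (fun row ci => if r < (xs.getD ci "").toList.length then row.set ci (some (String.mk [(xs.getD ci "").toList.getD r ' '])) else row) ((List.range xs.length).map (fun _ => (none : Option String))) with hR
    have hlen : R.length = xs.length := pv_rowfold_length xs r k
    by_cases hck : c = k
    · subst hck
      by_cases hc : c < xs.length
      · by_cases hfit : r < (xs.getD c "").toList.length
        · rw [if_pos hfit, List.getElem?_set_self',
              List.getElem?_eq_getElem (show c < R.length by omega),
              if_pos ⟨by omega, hc⟩, if_pos hfit]
          rfl
        · rw [if_neg hfit, ih c]
          split_ifs <;> rfl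
      · have hset : R.set c (some (String.mk [(xs.getD c "").toList.getD r ' '])) = R :=
          List.set_eq_of_length_le (by omega)
        have hnone : R[c]? = none := by
          rw [ih c]; split_ifs <;> first | rfl | omega
        have hstep : (if r < (xs.getD c "").toList.length then R.set c (some (String.mk [(xs.getD c "").toList.getD r ' '])) else R)[c]? = none := by
          split_ifs
          · rw [hset, hnone]
          · exact hnone
        rw [hstep]
        split_ifs <;> first | rfl | omega
    · have hstep : (if r < (xs.getD k "").toList.length then R.set k (some (String.mk [(xs.getD k "").toList.getD r ' '])) else R)[c]? = R[c]? := by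
        split_ifs
        · exact List.getElem?_set_ne (by omega)
        · rfl
      rw [hstep, ih c]
      split_ifs <;> first | rfl | omega

-- A's outer fold, rowwise: each row of the start matrix is transformed independently.
theorem pv_outer_getElem? (xs : List String) :
    ∀ (k : Nat) (m : List (List (Option String))) (r : Nat),
    ((List.range k).foldl (fun m ci =>
        (List.range ((xs.getD ci "").toList.length)).foldl (fun m ri =>
          m.set ri ((m.getD ri []).set ci (some (String.mk [(xs.getD ci "").toList.getD ri ' '])))) m) m)[r]?
      = (m[r]?).map (fun row =>
          (List.range k).foldl (fun row ci =>
            if r < (xs.getD ci "").toList.length then row.set ci (some (String.mk [(xs.getD ci "").toList.getD r ' '])) else row) row) := by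
  intro k
  induction k with
  | zero => intro m r; simp
  | succ k ih =>
    intro m r
    rw [List.range_succ, List.foldl_append]
    simp only [List.foldl_cons, List.foldl_nil]
    rw [pv_inner_getElem?, ih m r]
    cases m[r]? with
    | none => simp
    | some row =>
      simp only [Option.map_some, List.foldl_append, List.foldl_cons, List.foldl_nil]
      split <;> simp

theorem pv_A_eq_M (xs : List String) (h : xs ≠ []) : create_peer_matrix xs = pvM xs := by
  unfold create_peer_matrix
  simp only []
  apply List.ext_getElem?
  intro r
  rw [pv_outer_getElem? xs, pv_maxq_eq_maxLen xs h]
  unfold pvM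
  rw [List.getElem?_map, List.getElem?_map]
  by_cases hr : r < pvMaxLen xs
  · rw [List.getElem?_range hr]
    simp only [Option.map_some, Option.some.injEq]
    apply List.ext_getElem?
    intro c
    rw [pv_rowfold_getElem? xs r xs.length c, List.getElem?_map]
    by_cases hc : c < xs.length
    · rw [List.getElem?_eq_getElem hc]
      simp only [Option.map_some]
      rw [if_pos ⟨hc, hc⟩]
      have hgd : xs.getD c "" = xs[c] := List.getD_eq_getElem xs "" hc
      rw [hgd]
      rfl
    · rw [List.getElem?_eq_none (show xs.length ≤ c by omega), if_neg (by omega), if_neg hc]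
      rfl
  · rw [List.getElem?_eq_none (by simpa using hr)]
    rfl

-- ===== VERDICT (by name: the statement is the Claim_ definition above) =====
theorem create_peer_matrix_spec : Claim_equal_create_peer_matrix := by
  intro xs _ hpre
  unfold Spec_create_peer_matrix
  rw [pv_alt_eq_M, pv_A_eq_M xs hpre]
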